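-- pv_equiv track=rewrite | github.com/mrdrozdov/hf-transformers-demo | cluster.py | subword_offsets
-- ===== SOURCE A (Python) =====
-- def subword_offsets(subword_units):
--     res = []
--     sofar = 0
--     for x in subword_units:
--         size = len(x)
--         res.append((sofar, size))
--         sofar += size
--     return res
-- ===== SOURCE B (Python) =====
-- from itertools import accumulate
--
-- def subword_offsets(subword_units):
--     sizes = [len(x) for x in subword_units]
--     offsets = list(accumulate(sizes, initial=0))[:-1]
--     return list(zip(offsets, sizes))
-- ===== Notes on version B (the rewrite author's own statement) =====
-- stated objective: idiomatic
-- what changed: Replaced the fused accumulator loop with three separate passes: a sizes table, an itertools.accumulate prefix sum (dropping the final total), and a zip of offsets with sizes.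
import Mathlib
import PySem

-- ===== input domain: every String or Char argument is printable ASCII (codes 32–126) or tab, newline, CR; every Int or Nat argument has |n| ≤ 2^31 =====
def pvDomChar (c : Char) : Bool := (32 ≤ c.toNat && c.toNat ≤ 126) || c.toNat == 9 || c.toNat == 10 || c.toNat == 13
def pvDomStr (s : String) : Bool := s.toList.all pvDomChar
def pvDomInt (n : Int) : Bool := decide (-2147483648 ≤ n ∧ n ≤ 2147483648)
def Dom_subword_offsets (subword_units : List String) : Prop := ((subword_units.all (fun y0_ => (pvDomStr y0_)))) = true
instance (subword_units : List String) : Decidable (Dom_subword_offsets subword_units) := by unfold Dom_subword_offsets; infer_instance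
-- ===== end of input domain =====

-- B replaces A's fused accumulator loop with three passes (sizes table, prefix sum, zip) for a more idiomatic decomposition; same cost.


-- ===== PORT A =====
def subword_offsets (subword_units : List String) : List (Int × Int) :=
  (subword_units.foldl
    (fun (st : List (Int × Int) × Int) x =>
      let size : Int := PySem.Str.len x
      (st.1 ++ [(st.2, size)], st.2 + size))
    ([], 0)).1

-- ===== PORT B =====
-- accumulate(sizes, initial=0): running sums including the initial value
def pvAccum (init : Int) : List Int → List Int
  | [] => [init]
  | s :: t => init :: pvAccum (init + s) t

def subword_offsets_alt (subword_units : List String) : List (Int × Int) :=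
  let sizes := subword_units.map (fun x => PySem.Str.len x)
  let offsets := (pvAccum 0 sizes).dropLast
  offsets.zip sizes

-- ===== PRECONDITION & SPEC =====
def Spec_subword_offsets (subword_units : List String) (out : List (Int × Int)) : Prop := out = subword_offsets_alt subword_units
instance (subword_units : List String) (out : List (Int × Int)) : Decidable (Spec_subword_offsets subword_units out) := by unfold Spec_subword_offsets; infer_instance

-- ===== CLAIM (what is proved, stated in full; the proofs are below) =====
def Claim_equal_subword_offsets : Prop := ∀ (subword_units : List String), Dom_subword_offsets subword_units → Spec_subword_offsets subword_units (subword_offsets subword_units)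

-- ===== LEMMAS AND PROOFS =====

-- ===== VERDICT (by name: the statement is the Claim_ definition above) =====
theorem pv_loop (l : List String) (res : List (Int × Int)) (sofar : Int) :
    (l.foldl
      (fun (st : List (Int × Int) × Int) x =>
        let size : Int := PySem.Str.len x
        (st.1 ++ [(st.2, size)], st.2 + size))
      (res, sofar)).1
    = res ++ ((pvAccum sofar (l.map (fun x => PySem.Str.len x))).dropLast).zip
        (l.map (fun x => PySem.Str.len x)) := by
  induction l generalizing res sofar with
  | nil => simp [pvAccum]
  | cons x t ih =>
      simp only [List.foldl, List.map]
      rw [ih]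
      cases t with
      | nil => simp [pvAccum]
      | cons y u => simp [pvAccum, List.append_assoc]

theorem subword_offsets_spec : Claim_equal_subword_offsets := by
  intro l _
  unfold Spec_subword_offsets subword_offsets subword_offsets_alt
  simpa using pv_loop l [] 0
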